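-- pv_equiv track=rewrite | github.com/akzhan-maker/Homework-proga-1 | Laborotory 1/дз1.py | replace_every_nth
-- ===== SOURCE A (Python) =====
-- def replace_every_nth(text, n, char):
--     words = text.split(' ')
--     result_words = []
--     global_counter = 0
--     for word in words:
--         new_word = list(word)
--         if len(word) >= 3:
--             for i in range(len(new_word)):
--                 if not new_word[i].isdigit():
--                     global_counter += 1
--                     if global_counter % n == 0:
--                         new_word[i] = char
--         result_words.append("".join(new_word))
--     return " ".join(result_words)
-- ===== SOURCE B (Python) =====
-- def replace_every_nth(text, n, char):
--     # Two-pass decomposition: prefix-sum the non-digit counts of long words,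
--     # then render each word independently from its starting rank.
--     words = text.split(' ')
--     counts = [sum(not c.isdigit() for c in w) if len(w) >= 3 else 0 for w in words]
--     bases = []
--     acc = 0
--     for d in counts:
--         bases.append(acc)
--         acc += d
--     def render(base, w):
--         if len(w) < 3:
--             return w
--         seen = 0
--         pieces = []
--         for c in w:
--             if c.isdigit():
--                 pieces.append(c)
--             else:
--                 seen += 1
--                 pieces.append(char if (base + seen) % n == 0 else c)
--         return "".join(pieces)
--     return " ".join(render(b, w) for b, w in zip(bases, words))
-- ===== Notes on version B (the rewrite author's own statement) =====
-- stated objective: alternative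
-- what changed: A fuses scanning and replacement into one stateful pass with a global mutable counter threaded through nested loops; B first prefix-sums the non-digit counts of long words, then renders every word independently from its starting rank and joins the results.
import Mathlib
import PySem

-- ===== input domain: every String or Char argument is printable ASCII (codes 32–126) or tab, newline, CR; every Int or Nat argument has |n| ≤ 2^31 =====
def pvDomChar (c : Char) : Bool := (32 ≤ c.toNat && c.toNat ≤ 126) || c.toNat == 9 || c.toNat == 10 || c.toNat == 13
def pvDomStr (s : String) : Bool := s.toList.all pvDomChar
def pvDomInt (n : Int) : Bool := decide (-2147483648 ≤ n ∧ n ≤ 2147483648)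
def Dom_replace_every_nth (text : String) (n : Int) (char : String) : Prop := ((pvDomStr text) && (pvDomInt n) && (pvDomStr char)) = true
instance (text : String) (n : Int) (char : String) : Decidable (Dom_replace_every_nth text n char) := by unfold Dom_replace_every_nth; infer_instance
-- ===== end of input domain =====

-- B replaces A's fused stateful scan (one global mutable counter threaded through nested loops)
-- by a two-pass decomposition: prefix-sum the non-digit counts of long words, then render each
-- word independently from its starting rank. Objective: alternative (same cost, different structure).

-- ===== PORT A =====
-- body of 'for i in range(len(new_word))': state = (new_word as list of strings, global_counter);
-- new_word[i] is always in range (i comes from range(len)), so the none branch is unreachable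
def pvA_inner (n : Int) (char : List Char) (st : List (List Char) × Int) (i : Int) : List (List Char) × Int :=
  match PySem.List.pyGet? st.1 i with
  | some s =>
      if PySem.Chars.strIsdigit s then (st.1, st.2)
      else
        let g := st.2 + 1
        if PySem.Int.mod g n == 0 then (PySem.List.pySetD st.1 i char, g)
        else (st.1, g)
  | none => st

-- body of 'for word in words': new_word = list(word); run the index loop if len(word) >= 3;
-- append "".join(new_word)
def pvA_word (n : Int) (char : List Char) (st : List (List Char) × Int) (word : List Char) :
    List (List Char) × Int :=
  let nw := word.map (fun c => [c])
  let p :=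
    if 3 ≤ word.length then
      (PySem.List.pyRange 0 (nw.length : Int) 1).foldl (pvA_inner n char) (nw, st.2)
    else (nw, st.2)
  (st.1 ++ [PySem.Chars.join [] p.1], p.2)

def replace_every_nth (text : String) (n : Int) (char : String) : String :=
  String.ofList (PySem.Chars.join [' ']
    (((PySem.Chars.splitOn text.toList [' ']).foldl (pvA_word n char.toList) ([], 0)).1))

-- ===== PORT B =====
-- counts[wi] = sum(not c.isdigit() for c in w) if len(w) >= 3 else 0
def pvB_count (w : List Char) : Int :=
  if 3 ≤ w.length then w.foldl (fun a c => a + (if PySem.Chars.isdigit c then 0 else 1)) 0 else 0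

-- render(base, w): local seen-counter, pieces accumulator
def pvB_render (n : Int) (char : List Char) (base : Int) (w : List Char) : List Char :=
  if w.length < 3 then w
  else
    let st := w.foldl (fun (st : Int × List (List Char)) c =>
      if PySem.Chars.isdigit c then (st.1, st.2 ++ [[c]])
      else (st.1 + 1, st.2 ++ [if PySem.Int.mod (base + (st.1 + 1)) n == 0 then char else [c]]))
      (0, [])
    PySem.Chars.join [] st.2

-- bases: running prefix sums of counts
def replace_every_nth_alt (text : String) (n : Int) (char : String) : String :=
  String.ofList (PySem.Chars.join [' ']
    (((((PySem.Chars.splitOn text.toList [' ']).map pvB_count).foldl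
          (fun (st : List Int × Int) d => (st.1 ++ [st.2], st.2 + d)) ([], 0)).1.zip
        (PySem.Chars.splitOn text.toList [' '])).map
      (fun p => pvB_render n char.toList p.1 p.2)))

-- ===== PRECONDITION & SPEC =====
-- Pre_ excludes exactly the inputs on which Python A raises ZeroDivisionError: n = 0 while some
-- word of length ≥ 3 contains a non-digit character (only then is '% n' ever evaluated).
def Pre_replace_every_nth (text : String) (n : Int) (char : String) : Prop :=
  n ≠ 0 ∨ ∀ w ∈ PySem.Chars.splitOn text.toList [' '], 3 ≤ w.length → ∀ c ∈ w, PySem.Chars.isdigit c = true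
instance (text : String) (n : Int) (char : String) : Decidable (Pre_replace_every_nth text n char) := by unfold Pre_replace_every_nth; infer_instance
def pvWitness_replace_every_nth : String × Int × String := ("abc de 12", 2, "*")
def Spec_replace_every_nth (text : String) (n : Int) (char : String) (out : String) : Prop := out = replace_every_nth_alt text n char
instance (text : String) (n : Int) (char : String) (out : String) : Decidable (Spec_replace_every_nth text n char out) := by unfold Spec_replace_every_nth; infer_instance

-- ===== CLAIM (what is proved, stated in full; the proofs are below) =====
def Claim_equal_replace_every_nth : Prop := ∀ (text : String) (n : Int) (char : String), Dom_replace_every_nth text n char → Pre_replace_every_nth text n char → Spec_replace_every_nth text n char (replace_every_nth text n char)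

-- ===== LEMMAS AND PROOFS =====

-- common normal form: render a word's chars with running global rank g
def pvBody (n : Int) (char : List Char) : Int → List Char → List (List Char)
  | _, [] => []
  | g, c :: cs =>
    if PySem.Chars.isdigit c then [c] :: pvBody n char g cs
    else (if PySem.Int.mod (g + 1) n == 0 then char else [c]) :: pvBody n char (g + 1) cs

-- number of non-digit chars
def pvND : List Char → Int
  | [] => 0
  | c :: cs => (if PySem.Chars.isdigit c then 0 else 1) + pvND cs

def pvCount (w : List Char) : Int := if 3 ≤ w.length then pvND w else 0

-- render the whole word list with running base
def pvRenderAll (n : Int) (char : List Char) : Int → List (List Char) → List (List Char)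
  | _, [] => []
  | g, w :: ws =>
    (if 3 ≤ w.length then PySem.Chars.join [] (pvBody n char g w) else w)
      :: pvRenderAll n char (g + pvCount w) ws

theorem pv_set_append_length {α : Type} (pre : List α) (y : α) (rest : List α) (v : α) :
    (pre ++ y :: rest).set pre.length v = pre ++ v :: rest := by
  induction pre with
  | nil => rfl
  | cons a l ih => simp [List.set, ih]

theorem pv_strIsdigit_singleton (c : Char) :
    PySem.Chars.strIsdigit [c] = PySem.Chars.isdigit c := by
  simp [PySem.Chars.strIsdigit]

-- A's inner index loop, generalized over an already-processed prefix
theorem pvA_inner_spec (n : Int) (char : List Char) (cs : List Char) :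
    ∀ (pre : List (List Char)) (g : Int),
    (PySem.List.pyRange (pre.length : Int) ((pre.length : Int) + (cs.length : Int)) 1).foldl
        (pvA_inner n char) (pre ++ cs.map (fun c => [c]), g)
      = (pre ++ pvBody n char g cs, g + pvND cs) := by
  induction cs with
  | nil => intro pre g; simp [PySem.List.pyRange_one_eq_nil, pvBody, pvND]
  | cons c cs ih =>
    intro pre g
    rw [PySem.List.pyRange_one_cons (by push_cast [List.length_cons]; omega)]
    simp only [List.foldl_cons]
    have hget : PySem.List.pyGet? (pre ++ (c :: cs).map (fun c => [c])) (pre.length : Int)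
        = some [c] := by
      simpa using PySem.List.pyGet?_append_length pre ((cs).map (fun c => [c])) [c]
    have hrange : ∀ (x : List Char),
        PySem.List.pyRange ((pre.length : Int) + 1)
          ((pre.length : Int) + ((c :: cs).length : Int)) 1
        = PySem.List.pyRange (((pre ++ [x]).length : Int))
            (((pre ++ [x]).length : Int) + (cs.length : Int)) 1 := by
      intro x; congr 1 <;> (simp; try omega)
    by_cases hd : PySem.Chars.isdigit c
    · have hstep : pvA_inner n char (pre ++ (c :: cs).map (fun c => [c]), g) (pre.length : Int)
          = (pre ++ [[c]] ++ cs.map (fun c => [c]), g) := by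
        simp [pvA_inner, hget, pv_strIsdigit_singleton, hd]
      rw [hstep, hrange [c], ih (pre ++ [[c]]) g]
      simp [pvBody, pvND, hd, add_comm]
    · by_cases hm : PySem.Int.mod (g + 1) n == 0
      · have hset : PySem.List.pySetD (pre ++ (c :: cs).map (fun c => [c])) (pre.length : Int) char
            = pre ++ [char] ++ cs.map (fun c => [c]) := by
          rw [show ((pre.length : Int)) = ((pre.length : Nat) : Int) from rfl,
            PySem.List.pySetD_natCast]
          simp only [List.map_cons]
          rw [pv_set_append_length]
          simp
        have hstep : pvA_inner n char (pre ++ (c :: cs).map (fun c => [c]), g) (pre.length : Int)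
            = (pre ++ [char] ++ cs.map (fun c => [c]), g + 1) := by
          simp [pvA_inner, hget, pv_strIsdigit_singleton, hd, hm, hset]
        rw [hstep, hrange char, ih (pre ++ [char]) (g + 1)]
        simp only [pvBody, pvND, if_neg hd, hm, if_true, Prod.mk.injEq]
        refine ⟨by simp, by ring⟩
      · have hstep : pvA_inner n char (pre ++ (c :: cs).map (fun c => [c]), g) (pre.length : Int)
            = (pre ++ [[c]] ++ cs.map (fun c => [c]), g + 1) := by
          simp [pvA_inner, hget, pv_strIsdigit_singleton, hd, hm]
        rw [hstep, hrange [c], ih (pre ++ [[c]]) (g + 1)]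
        simp only [pvBody, pvND, if_neg hd, if_neg hm, Prod.mk.injEq]
        refine ⟨by simp, by ring⟩

-- B's render loop equals pvBody
theorem pvB_render_loop (n : Int) (char : List Char) (base : Int) (cs : List Char) :
    ∀ (k : Int) (acc : List (List Char)),
    cs.foldl (fun (st : Int × List (List Char)) c =>
      if PySem.Chars.isdigit c then (st.1, st.2 ++ [[c]])
      else (st.1 + 1, st.2 ++ [if PySem.Int.mod (base + (st.1 + 1)) n == 0 then char else [c]]))
      (k, acc)
    = (k + pvND cs, acc ++ pvBody n char (base + k) cs) := by
  induction cs with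
  | nil => intro k acc; simp [pvND, pvBody]
  | cons c cs ih =>
    intro k acc
    by_cases hd : PySem.Chars.isdigit c
    · simp only [List.foldl_cons, if_pos hd]
      rw [ih k (acc ++ [[c]])]
      simp [pvBody, pvND, hd, add_comm]
    · simp only [List.foldl_cons, if_neg hd]
      rw [ih (k + 1) _]
      simp only [pvBody, pvND, if_neg hd, Prod.mk.injEq]
      refine ⟨by ring, ?_⟩
      rw [show base + (k + 1) = base + k + 1 by ring]
      simp

theorem pvB_render_eq (n : Int) (char : List Char) (base : Int) (w : List Char) :
    pvB_render n char base w
      = if 3 ≤ w.length then PySem.Chars.join [] (pvBody n char base w) else w := by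
  unfold pvB_render
  rcases lt_or_ge w.length 3 with h | h
  · simp [h, Nat.not_le.mpr h]
  · rw [if_neg (by omega), if_pos h, pvB_render_loop n char base w 0 []]
    simp

theorem pvB_count_eq (w : List Char) : pvB_count w = pvCount w := by
  unfold pvB_count pvCount
  congr 1
  have h : ∀ (cs : List Char) (a : Int),
      cs.foldl (fun a c => a + (if PySem.Chars.isdigit c then 0 else 1)) a = a + pvND cs := by
    intro cs
    induction cs with
    | nil => intro a; simp [pvND]
    | cons c cs ih => intro a; simp only [List.foldl_cons, ih, pvND]; ring
  simpa using h w 0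

-- A's outer word loop
theorem pvA_outer (n : Int) (char : List Char) (ws : List (List Char)) :
    ∀ (acc : List (List Char)) (g : Int),
    ws.foldl (pvA_word n char) (acc, g)
    = (acc ++ pvRenderAll n char g ws, g + (ws.map pvCount).sum) := by
  induction ws with
  | nil => intro acc g; simp [pvRenderAll]
  | cons w ws ih =>
    intro acc g
    simp only [List.foldl_cons]
    by_cases h3 : 3 ≤ w.length
    · have hi := pvA_inner_spec n char w [] g
      simp only [List.nil_append, List.length_nil, Nat.cast_zero, zero_add] at hi
      have hw : pvA_word n char (acc, g) w
          = (acc ++ [PySem.Chars.join [] (pvBody n char g w)], g + pvND w) := by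
        simp only [pvA_word, if_pos h3, List.length_map]
        rw [hi]
      rw [hw, ih]
      simp [pvRenderAll, pvCount, h3, List.sum_cons]
      ring
    · have hw : pvA_word n char (acc, g) w = (acc ++ [w], g) := by
        simp [pvA_word, if_neg h3, PySem.Chars.join_nil_singletons]
      rw [hw, ih]
      simp [pvRenderAll, pvCount, h3, List.sum_cons]

-- B's prefix loop
theorem pvB_prefix (counts : List Int) :
    ∀ (acc : List Int) (a : Int),
    counts.foldl (fun (st : List Int × Int) d => (st.1 ++ [st.2], st.2 + d)) (acc, a)
    = (acc ++ (counts.foldr (fun d f => fun a => a :: f (a + d)) (fun _ => []) a), a + counts.sum) := by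
  induction counts with
  | nil => intro acc a; simp
  | cons d ds ih =>
    intro acc a
    simp only [List.foldl_cons, List.foldr_cons, ih]
    simp [List.sum_cons]
    ring

theorem pvB_zip (n : Int) (char : List Char) (ws : List (List Char)) :
    ∀ (a : Int),
    ((((ws.map pvB_count).foldr (fun d f => fun a => a :: f (a + d)) (fun _ => []) a)).zip ws).map
        (fun p => pvB_render n char p.1 p.2)
    = pvRenderAll n char a ws := by
  induction ws with
  | nil => intro a; simp [pvRenderAll]
  | cons w ws ih =>
    intro a
    simp only [List.map_cons, List.foldr_cons, List.zip_cons_cons, List.map_cons]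
    rw [ih, pvB_render_eq, pvB_count_eq]
    rfl

-- ===== VERDICT (by name: the statement is the Claim_ definition above) =====
theorem replace_every_nth_spec : Claim_equal_replace_every_nth := by
  intro text n char _ _
  unfold Spec_replace_every_nth replace_every_nth replace_every_nth_alt
  rw [pvA_outer n char.toList (PySem.Chars.splitOn text.toList [' ']) [] 0,
    pvB_prefix (((PySem.Chars.splitOn text.toList [' ']).map pvB_count)) [] 0]
  simp only [List.nil_append]
  rw [pvB_zip n char.toList (PySem.Chars.splitOn text.toList [' ']) 0]
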